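-- pv_equiv track=rewrite | github.com/neil-the-nowledgable/wayfinder-demo-retail | demo/run_self_tracking_demo.py | _truncate_to_valid_yaml
-- ===== SOURCE A (Python) =====
-- def _truncate_to_valid_yaml(text: str) -> str:
--     """Strip trailing non-YAML commentary (markdown headings, prose, etc.)."""
--     # YAML documents end at `---` or `...` or when non-YAML prose appears.
--     # Look for lines starting with `##` (markdown heading) which signal
--     # the drafter's commentary rather than YAML content.
--     lines = text.split('\n')
--     cut = len(lines)
--     for i, line in enumerate(lines):
--         stripped = line.strip()
--         if stripped.startswith('## ') or stripped.startswith('# '):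
--             # Markdown heading after YAML content -> commentary starts here
--             cut = i
--             break
--     return '\n'.join(lines[:cut]).strip()
-- ===== SOURCE B (Python) =====
-- def _truncate_to_valid_yaml(text: str) -> str:
--     """Strip trailing non-YAML commentary by jumping between hash occurrences.
--
--     Instead of splitting into lines, hop over the text with str.find,
--     validating each hash in place: it starts a heading line iff everything
--     since the preceding newline is whitespace, the (one- or two-character)
--     hash run is followed by a space and some non-whitespace before the line
--     end.  Heading-free stretches are skipped wholesale by find/rfind.
--     """
--     ws = ' \t\r\x0b\x0c'
--     n = len(text)
--     pos = 0
--     while True: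
--         j = text.find('#', pos)
--         if j == -1:
--             return text.strip()
--         ls = text.rfind('\n', 0, j) + 1
--         if all(c in ws for c in text[ls:j]):
--             k = j + 1
--             if k < n and text[k] == '#':
--                 k += 1
--             nl = text.find('\n', j)
--             end = n if nl == -1 else nl
--             if k < end and text[k] == ' ' and any(c not in ws for c in text[k + 1:end]):
--                 return text[:ls].strip()
--         pos = j + 1
-- ===== Notes on version B (the rewrite author's own statement) =====
-- stated objective: alternative
-- what changed: Instead of splitting the text into lines and testing each stripped line with startswith, B hops between hash-character occurrences with str.find, checks each candidate in place (str.rfind for the preceding newline, an all-whitespace test on the line prefix, the hash run, a space and a non-whitespace character before the line end) and slices the original text once; no line list or per-line stripped strings are built.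
import Mathlib
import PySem

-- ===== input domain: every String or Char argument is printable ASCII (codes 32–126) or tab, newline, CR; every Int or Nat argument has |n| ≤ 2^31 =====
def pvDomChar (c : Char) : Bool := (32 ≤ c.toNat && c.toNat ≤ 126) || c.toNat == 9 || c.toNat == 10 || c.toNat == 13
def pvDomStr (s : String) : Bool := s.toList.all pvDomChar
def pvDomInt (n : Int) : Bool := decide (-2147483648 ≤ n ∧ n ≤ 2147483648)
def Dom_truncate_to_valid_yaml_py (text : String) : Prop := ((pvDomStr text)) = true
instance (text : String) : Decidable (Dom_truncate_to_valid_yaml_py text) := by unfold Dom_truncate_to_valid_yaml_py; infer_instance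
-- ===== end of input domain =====

-- B replaces A's split-into-lines/strip-each-line/startswith pipeline with a hash-hopping scan:
-- it jumps between hash occurrences (Python str.find) and validates each candidate in place
-- against the preceding newline (str.rfind); objective: alternative (same O(n) cost, a
-- different traversal that never materialises the line list).

-- ===== PORT A =====
-- `stripped.startswith('## ') or stripped.startswith('# ')`
def pvHeadA (line : List Char) : Bool :=
  PySem.Chars.startswith (PySem.Chars.strip line) ['#', '#', ' '] ||
  PySem.Chars.startswith (PySem.Chars.strip line) ['#', ' ']

-- the `for i, line in enumerate(lines): … cut = i; break` loop: cut is the index of the first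
-- heading line, defaulting to len(lines) (then lines[:cut] is lines.take of it)
def pvCutA : List (List Char) → Nat
  | [] => 0
  | l :: ls => if pvHeadA l then 0 else pvCutA ls + 1

def truncate_to_valid_yaml_py (text : String) : String :=
  let lines := PySem.Chars.splitOn text.toList ['\n']
  String.ofList (PySem.Chars.strip (PySem.Chars.join ['\n'] (lines.take (pvCutA lines))))

-- ===== PORT B =====
-- `c in ws` for B's ws = ' \t\r\x0b\x0c'
def pvWsB (c : Char) : Bool :=
  c == ' ' || c == '\t' || c == '\r' || c == Char.ofNat 11 || c == Char.ofNat 12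

-- `k < end and text[k] == ' ' and any(c not in ws for c in text[k+1:end])` with t = text[k:]
-- (text[k+1:end], end = next newline or n, is t.tail.takeWhile (· != '\n'))
def pvAfterB : List Char → Bool
  | [] => false
  | c :: u => c == ' ' && (u.takeWhile (· != '\n')).any (fun d => !pvWsB d)

-- `k = j + 1; if k < n and text[k] == '#': k += 1` then the pvAfterB test, with r = text[j+1:]
def pvHeadCheckB : List Char → Bool
  | [] => false
  | c :: t => if c == '#' then pvAfterB t else pvAfterB (c :: t)

-- B's main loop.  State: pre = text[:pos'] where pos' is the current line-scan origin
-- (everything before the last examined '#', inclusive), suf = the rest.  One step =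
-- `j = text.find('#', pos)` (the takeWhile/dropWhile split of suf at '#'); `j == -1` is the
-- `[]` branch (return text.strip() = strip (pre ++ suf)); otherwise `text.rfind('\n', 0, j)`
-- and `all(c in ws for c in text[ls:j])` is the reverse-takeWhile test on pre ++ before,
-- `text[:ls]` is the reverse-dropWhile prefix, and on failure pos becomes j + 1.
def pvFindB (pre suf : List Char) : List Char :=
  let before := suf.takeWhile (· != '#')
  match h : suf.dropWhile (· != '#') with
  | [] => PySem.Chars.strip (pre ++ before)
  | _ :: r =>
    if ((pre ++ before).reverse.takeWhile (· != '\n')).all pvWsB && pvHeadCheckB r then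
      PySem.Chars.strip (((pre ++ before).reverse.dropWhile (· != '\n')).reverse)
    else pvFindB (pre ++ before ++ ['#']) r
termination_by suf.length
decreasing_by
  have h1 := List.length_dropWhile_le (fun c => c != '#') suf
  rw [h] at h1
  simp only [List.length_cons] at h1
  omega

def truncate_to_valid_yaml_py_alt (text : String) : String :=
  String.ofList (pvFindB [] text.toList)

-- ===== PRECONDITION & SPEC =====
def Spec_truncate_to_valid_yaml_py (text : String) (out : String) : Prop := out = truncate_to_valid_yaml_py_alt text
instance (text : String) (out : String) : Decidable (Spec_truncate_to_valid_yaml_py text out) := by unfold Spec_truncate_to_valid_yaml_py; infer_instance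

-- ===== CLAIM (what is proved, stated in full; the proofs are below) =====
def Claim_equal_truncate_to_valid_yaml_py : Prop := ∀ (text : String), Dom_truncate_to_valid_yaml_py text → Spec_truncate_to_valid_yaml_py text (truncate_to_valid_yaml_py text)

-- ===== LEMMAS AND PROOFS =====

-- proof-side: the whitespace-prefix test of pvFindB as a predicate on the consumed prefix
def pvWsLine (x : List Char) : Bool := (x.reverse.takeWhile (· != '\n')).all pvWsB

-- proof-side model of A's per-line heading test after the leading-ws skip (old port-B shape)
def pvHeadTail : List Char → Bool
  | ' ' :: rest => rest.any (fun c => !pvWsB c)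
  | _ => false

def pvIsHeadB (line : List Char) : Bool :=
  match line.dropWhile pvWsB with
  | [] => false
  | c :: rest =>
    if c = '#' then
      match rest with
      | [] => pvHeadTail []
      | c2 :: t => if c2 = '#' then pvHeadTail t else pvHeadTail (c2 :: t)
    else false

-- proof-side: per-line heading test phrased through pvHeadCheckB
def pvLineHead (l : List Char) : Bool :=
  match l.dropWhile pvWsB with
  | [] => false
  | c :: rest => if c == '#' then pvHeadCheckB rest else false

theorem pv_ws_eq (c : Char) (hd : pvDomChar c = true) (hn : c ≠ '\n') :
    pvWsB c = PySem.Chars.isspace c := by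
  have hiff : ∀ d : Char, (c == d) = (c.toNat == d.toNat) := by
    intro d
    by_cases h : c = d
    · simp [h]
    · have : c.toNat ≠ d.toNat := by
        intro he
        apply h
        have : c.val.toNat = d.val.toNat := he
        exact Char.ext (UInt32.toNat_inj.mp this)
      simp [h, this]
  have hnn : c.toNat ≠ 10 := by
    intro he
    apply hn
    have : c.val.toNat = ('\n' : Char).val.toNat := he
    exact Char.ext (UInt32.toNat_inj.mp this)
  simp only [pvDomChar, Bool.or_eq_true, Bool.and_eq_true, decide_eq_true_eq, beq_iff_eq] at hd
  simp only [pvWsB, PySem.Chars.isspace, hiff]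
  have h11 : (Char.ofNat 11).toNat = 11 := by decide
  have h12 : (Char.ofNat 12).toNat = 12 := by decide
  have hsp : (' ' : Char).toNat = 32 := by decide
  have ht : ('\t' : Char).toNat = 9 := by decide
  have hr : ('\r' : Char).toNat = 13 := by decide
  rw [h11, h12, hsp, ht, hr]
  apply Bool.eq_iff_iff.mpr
  simp only [Bool.or_eq_true, Nat.beq_eq_true_eq, beq_iff_eq, decide_eq_true_eq, Bool.and_eq_true]
  omega

theorem pv_dropWhile_congr {p q : Char → Bool} : ∀ (l : List Char), (∀ c ∈ l, p c = q c) →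
    List.dropWhile p l = List.dropWhile q l
  | [], _ => rfl
  | c :: t, h => by
    have hc := h c (by simp)
    by_cases hpc : p c = true
    · rw [List.dropWhile_cons_of_pos hpc, List.dropWhile_cons_of_pos (hc ▸ hpc),
        pv_dropWhile_congr t (fun x hx => h x (by simp [hx]))]
    · simp only [Bool.not_eq_true] at hpc
      rw [List.dropWhile_cons_of_neg (by simp [hpc]), List.dropWhile_cons_of_neg (by simp [← hc, hpc])]

theorem pv_rstrip_cons (c : Char) (t : List Char) :
    PySem.Chars.rstrip (c :: t) =
      if PySem.Chars.isspace c && (PySem.Chars.rstrip t).isEmpty then []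
      else c :: PySem.Chars.rstrip t := by
  have hre : (PySem.Chars.rstrip t).isEmpty = (List.dropWhile PySem.Chars.isspace t.reverse).isEmpty := by
    simp [PySem.Chars.rstrip]
  simp only [PySem.Chars.rstrip, List.reverse_cons, List.dropWhile_append, hre]
  by_cases he : (List.dropWhile PySem.Chars.isspace t.reverse).isEmpty
  · by_cases hc : PySem.Chars.isspace c
    · simp [he, List.dropWhile, hc]
    · simp only [Bool.not_eq_true] at hc
      simp [he, List.dropWhile, hc, List.isEmpty_iff.mp he]
  · simp only [Bool.not_eq_true] at he
    simp [he]

theorem pv_rstrip_eq_nil_iff (t : List Char) :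
    PySem.Chars.rstrip t = [] ↔ ∀ c ∈ t, PySem.Chars.isspace c = true := by
  simp [PySem.Chars.rstrip, List.dropWhile_eq_nil_iff]

theorem pv_headTail_eq (t : List Char) (hd : ∀ c ∈ t, pvDomChar c = true) (hn : '\n' ∉ t) :
    pvHeadTail t = List.isPrefixOf [' '] (PySem.Chars.rstrip t) := by
  have hws : ∀ c ∈ t, pvWsB c = PySem.Chars.isspace c := fun c hc =>
    pv_ws_eq c (hd c hc) (fun h => hn (h ▸ hc))
  cases t with
  | nil => simp [pvHeadTail, PySem.Chars.rstrip]
  | cons x r =>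
    rw [pv_rstrip_cons]
    have hwr : ∀ c ∈ r, pvWsB c = PySem.Chars.isspace c := fun c hc => hws c (by simp [hc])
    by_cases hx : x = ' '
    · subst hx
      by_cases he : (PySem.Chars.rstrip r).isEmpty
      · have hall := (pv_rstrip_eq_nil_iff r).mp (List.isEmpty_iff.mp he)
        simp only [pvHeadTail, he, Bool.and_true, if_pos (by decide : PySem.Chars.isspace ' ' = true)]
        simp only [List.isPrefixOf]
        rw [List.any_eq_false]
        intro c hc
        simp [hwr c hc, hall c hc]
      · simp only [Bool.not_eq_true] at he
        simp only [pvHeadTail, he, Bool.and_false, if_neg Bool.false_ne_true]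
        simp only [List.isPrefixOf, beq_self_eq_true, Bool.true_and]
        rw [List.any_eq_true]
        have : ¬ ∀ c ∈ r, PySem.Chars.isspace c = true := by
          intro hall
          rw [List.isEmpty_iff.mpr ((pv_rstrip_eq_nil_iff r).mpr hall)] at he
          exact absurd he.symm Bool.false_ne_true
        push Not at this
        obtain ⟨c, hc, hcs⟩ := this
        refine ⟨c, hc, ?_⟩
        simp only [Bool.not_eq_true] at hcs
        simp [hwr c hc, hcs]
    · have h1 : pvHeadTail (x :: r) = false := by
        unfold pvHeadTail
        split
        · next heq =>
            injection heq with h _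
            first
            | exact absurd h hx
            | exact absurd h.symm hx
        · rfl
      rw [h1]
      by_cases hcond : (PySem.Chars.isspace x && (PySem.Chars.rstrip r).isEmpty) = true
      · simp [hcond]
      · simp only [hcond, if_neg Bool.false_ne_true]
        have hxx : (' ' == x) = false := by simpa using fun h => hx h.symm
        simp [List.isPrefixOf, hxx]

theorem pv_prefix_hash_false (p : List Char) (t : List Char)
    (h : ∀ y e, t = y :: e → y ≠ '#') :
    List.isPrefixOf ('#' :: p) (PySem.Chars.rstrip t) = false := by
  cases t with
  | nil => simp [PySem.Chars.rstrip]
  | cons y e =>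
    rw [pv_rstrip_cons]
    have hy : ('#' == y) = false := by simpa using fun hh => h y e rfl hh.symm
    by_cases hc : (PySem.Chars.isspace y && (PySem.Chars.rstrip e).isEmpty) = true
    · simp [hc]
    · simp only [hc, if_neg Bool.false_ne_true]
      simp [List.isPrefixOf, hy]

theorem pv_head_eq (line : List Char) (hd : ∀ c ∈ line, pvDomChar c = true)
    (hn : '\n' ∉ line) : pvIsHeadB line = pvHeadA line := by
  have hws : ∀ c ∈ line, pvWsB c = PySem.Chars.isspace c := fun c hc =>
    pv_ws_eq c (hd c hc) (fun h => hn (h ▸ hc))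
  have hdw : line.dropWhile pvWsB = line.dropWhile PySem.Chars.isspace :=
    pv_dropWhile_congr line hws
  have hstrip : PySem.Chars.strip line =
      PySem.Chars.rstrip (List.dropWhile PySem.Chars.isspace line) := rfl
  have hsub : ∀ c ∈ List.dropWhile PySem.Chars.isspace line, c ∈ line :=
    fun c hc => (List.dropWhile_sublist _).mem hc
  unfold pvIsHeadB pvHeadA PySem.Chars.startswith
  rw [hdw, hstrip]
  set d := List.dropWhile PySem.Chars.isspace line with hdd
  have hdDom : ∀ c ∈ d, pvDomChar c = true := fun c hc => hd c (hsub c hc)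
  have hdN : '\n' ∉ d := fun hc => hn (hsub _ hc)
  clear_value d
  have hhash : PySem.Chars.isspace '#' = false := by decide
  rcases d with _ | ⟨c, rest⟩
  · simp [PySem.Chars.rstrip]
  · by_cases hc : c = '#'
    · subst hc
      rcases rest with _ | ⟨y, t⟩
      · decide
      · rw [pv_rstrip_cons ('#' : Char), if_neg (by simp [hhash])]
        by_cases hy : y = '#'
        · subst hy
          rw [pv_rstrip_cons ('#' : Char), if_neg (by simp [hhash])]
          have hK := pv_headTail_eq t (fun x hx => hdDom x (by simp [hx]))
            (fun hx => hdN (by simp [hx]))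
          simp [List.isPrefixOf, hK]
        · have h1 := pv_prefix_hash_false [' '] (y :: t) (fun z e hz => by
            injection hz with h2 _; exact h2 ▸ hy)
          have hK := pv_headTail_eq (y :: t) (fun x hx => hdDom x (List.mem_cons_of_mem _ hx))
            (fun hx => hdN (List.mem_cons_of_mem _ hx))
          simp [hy, hK, List.isPrefixOf, h1]
    · have h1 := pv_prefix_hash_false ['#', ' '] (c :: rest) (fun z e hz => by
        injection hz with h2 _; exact h2 ▸ hc)
      have h2 := pv_prefix_hash_false [' '] (c :: rest) (fun z e hz => by
        injection hz with h3 _; exact h3 ▸ hc)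
      simp [hc, h1, h2]

-- proof-side model of text.split('\n')
def pvLines : List Char → List (List Char)
  | [] => [[]]
  | c :: r => if c = '\n' then [] :: pvLines r else (pvLines r).modifyHead (c :: ·)

theorem pv_go_eq : ∀ (fuel : Nat) (l cur : List Char) (acc : List (List Char)),
    l.length < fuel →
    PySem.Chars.splitOn.go ['\n'] fuel l cur acc =
      acc.reverse ++ (pvLines l).modifyHead (cur.reverse ++ ·) := by
  intro fuel
  induction fuel with
  | zero => intro l cur acc h; exact absurd h (by omega)
  | succ f ih =>
    intro l cur acc h
    cases l with
    | nil =>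
      simp [PySem.Chars.splitOn.go, pvLines]
    | cons c rest =>
      by_cases hc : c = '\n'
      · subst hc
        rw [PySem.Chars.splitOn.go]
        have hpre : List.isPrefixOf ['\n'] ('\n' :: rest) = true := by
          simp [List.isPrefixOf]
        rw [hpre]
        simp only [if_pos, List.length_cons, List.length_singleton, List.drop_succ_cons,
          List.drop_zero, ite_true, List.length_nil]
        rw [ih rest [] (cur.reverse :: acc) (by simp at h ⊢; omega)]
        simp only [pvLines, if_pos rfl, List.modifyHead_cons, List.reverse_cons,
          List.reverse_nil, List.nil_append, List.append_assoc, List.singleton_append,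
          List.append_nil]
        cases pvLines rest <;> simp
      · rw [PySem.Chars.splitOn.go]
        have hpre : List.isPrefixOf ['\n'] (c :: rest) = false := by
          simp [List.isPrefixOf]
          intro hh; exact absurd hh.symm hc
        rw [hpre]
        simp only [Bool.false_eq_true, if_neg, ite_false]
        rw [ih rest (c :: cur) acc (by simp at h ⊢; omega)]
        simp only [pvLines, if_neg hc, List.modifyHead_modifyHead]
        have hfun : ((fun x => cur.reverse ++ x) ∘ (fun x => c :: x)) =
            (fun x => (c :: cur).reverse ++ x) := by
          funext x; simp
        rw [hfun]

theorem pv_splitOn_eq (s : List Char) : PySem.Chars.splitOn s ['\n'] = pvLines s := by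
  rw [PySem.Chars.splitOn, pv_go_eq (s.length + 1) s [] [] (by omega)]
  simp only [List.reverse_nil, List.nil_append]
  cases pvLines s <;> simp

theorem pv_pvLines_eq (s : List Char) :
    pvLines s = s.takeWhile (· != '\n') ::
      (match s.dropWhile (· != '\n') with
       | [] => []
       | _ :: r => pvLines r) := by
  induction s with
  | nil => rfl
  | cons c r ih =>
    by_cases hc : c = '\n'
    · subst hc
      simp [pvLines, List.takeWhile_cons, List.dropWhile_cons]
    · rw [pvLines, if_neg hc, ih]
      simp only [List.takeWhile_cons, List.dropWhile_cons]
      have hb : (c != '\n') = true := by simpa using hc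
      simp [hb]

theorem pv_rstrip_snoc (y : List Char) (c : Char) (hc : PySem.Chars.isspace c = true) :
    PySem.Chars.rstrip (y ++ [c]) = PySem.Chars.rstrip y := by
  simp [PySem.Chars.rstrip, List.dropWhile_cons, hc]

theorem pv_strip_snoc_nl (x : List Char) :
    PySem.Chars.strip (x ++ ['\n']) = PySem.Chars.strip x := by
  show PySem.Chars.rstrip (List.dropWhile PySem.Chars.isspace (x ++ ['\n'])) =
    PySem.Chars.rstrip (List.dropWhile PySem.Chars.isspace x)
  rw [List.dropWhile_append]
  by_cases he : (List.dropWhile PySem.Chars.isspace x).isEmpty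
  · simp only [he, if_pos, ite_true]
    rw [List.isEmpty_iff.mp he]
    simp [List.dropWhile, PySem.Chars.rstrip, (by decide : PySem.Chars.isspace '\n' = true)]
  · simp only [he, ite_false, Bool.false_eq_true, if_neg]
    exact pv_rstrip_snoc _ _ (by decide)

-- ===== small takeWhile/dropWhile toolbox =====

theorem pv_takeWhile_nonl (u : List Char) (h : '\n' ∉ u) : u.takeWhile (· != '\n') = u := by
  induction u with
  | nil => rfl
  | cons c t ih =>
    have hc : (c != '\n') = true := by simpa using fun hh : c = '\n' => h (by simp [hh])
    simp [List.takeWhile_cons, hc, ih (fun hm => h (by simp [hm]))]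

theorem pv_dropWhile_nonl (u : List Char) (h : '\n' ∉ u) : u.dropWhile (· != '\n') = [] := by
  rw [List.dropWhile_eq_nil_iff]
  intro c hc
  simpa using fun hh : c = '\n' => h (hh ▸ hc)

theorem pv_takeWhile_append_nl (u v : List Char) :
    (u ++ '\n' :: v).takeWhile (· != '\n') = u.takeWhile (· != '\n') := by
  induction u with
  | nil => simp [List.takeWhile_cons]
  | cons c t ih =>
    by_cases hc : c = '\n'
    · subst hc; simp [List.takeWhile_cons]
    · have hb : (c != '\n') = true := by simpa using hc
      simp only [List.cons_append, List.takeWhile_cons, hb, ite_true, ih]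

theorem pv_takeWhile_nonl_append (u v : List Char) (h : '\n' ∉ u) :
    (u ++ v).takeWhile (· != '\n') = u ++ v.takeWhile (· != '\n') := by
  induction u with
  | nil => simp
  | cons c t ih =>
    have hc : (c != '\n') = true := by simpa using fun hh : c = '\n' => h (by simp [hh])
    simp only [List.cons_append, List.takeWhile_cons, hc, ite_true,
      ih (fun hm => h (by simp [hm]))]

theorem pv_dropWhile_nonl_nl (u v : List Char) (h : '\n' ∉ u) :
    (u ++ '\n' :: v).dropWhile (· != '\n') = '\n' :: v := by
  rw [List.dropWhile_append, pv_dropWhile_nonl u h]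
  simp [List.dropWhile_cons]

theorem pv_dropWhile_head {p : Char → Bool} : ∀ (s : List Char) (c : Char) (r : List Char),
    s.dropWhile p = c :: r → p c = false
  | [], c, r, h => by simp at h
  | a :: t, c, r, h => by
    by_cases ha : p a = true
    · rw [List.dropWhile_cons_of_pos ha] at h
      exact pv_dropWhile_head t c r h
    · simp only [Bool.not_eq_true] at ha
      rw [List.dropWhile_cons_of_neg (by simp [ha])] at h
      injection h with h1 _
      exact h1 ▸ ha

theorem pv_dropWhile_all {p : Char → Bool} : ∀ (x z : List Char), (∀ c ∈ x, p c = true) →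
    (x ++ z).dropWhile p = z.dropWhile p
  | [], z, _ => rfl
  | c :: t, z, h => by
    rw [List.cons_append, List.dropWhile_cons_of_pos (h c (by simp))]
    exact pv_dropWhile_all t z (fun d hd => h d (by simp [hd]))

-- ===== the heading test: line-local vs text-global =====

theorem pv_afterB_append_nl (t v : List Char) : pvAfterB (t ++ '\n' :: v) = pvAfterB t := by
  cases t with
  | nil => simp [pvAfterB]
  | cons c u => simp [pvAfterB, pv_takeWhile_append_nl]

theorem pv_headCheck_append_nl (t v : List Char) :
    pvHeadCheckB (t ++ '\n' :: v) = pvHeadCheckB t := by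
  cases t with
  | nil => simp [pvHeadCheckB, pvAfterB]
  | cons c u =>
    simp only [List.cons_append, pvHeadCheckB]
    by_cases hc : c == '#'
    · simp [hc, pv_afterB_append_nl]
    · simp only [Bool.not_eq_true] at hc
      simp only [hc, Bool.false_eq_true, if_neg, ite_false]
      rw [show c :: (u ++ '\n' :: v) = (c :: u) ++ '\n' :: v from rfl, pv_afterB_append_nl]

theorem pv_headCheck_takeWhile (r : List Char) :
    pvHeadCheckB (r.takeWhile (· != '\n')) = pvHeadCheckB r := by
  conv_rhs => rw [← List.takeWhile_append_dropWhile (p := (· != '\n')) (l := r)]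
  cases hdr : r.dropWhile (· != '\n') with
  | nil => simp
  | cons c v =>
    have hc : c = '\n' := by simpa using pv_dropWhile_head r c v hdr
    subst hc
    rw [pv_headCheck_append_nl]

theorem pv_headTail_ne (c : Char) (u : List Char) (h : c ≠ ' ') : pvHeadTail (c :: u) = false := by
  unfold pvHeadTail
  split
  · next heq =>
      injection heq with h1 _
      first
      | exact absurd h1 h
      | exact absurd h1.symm h
  · rfl

theorem pv_afterB_eq (t : List Char) (hn : '\n' ∉ t) : pvAfterB t = pvHeadTail t := by
  cases t with
  | nil => rfl
  | cons c u =>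
    by_cases hc : c = ' '
    · subst hc
      have hu : u.takeWhile (· != '\n') = u := pv_takeWhile_nonl u (fun hm => hn (by simp [hm]))
      simp [pvAfterB, pvHeadTail, hu]
    · have hb : (c == ' ') = false := by simpa using hc
      simp [pvAfterB, hb, pv_headTail_ne c u hc]

theorem pv_lineHead_eq (l : List Char) (hn : '\n' ∉ l) : pvLineHead l = pvIsHeadB l := by
  unfold pvLineHead pvIsHeadB
  have hsub : ∀ c ∈ l.dropWhile pvWsB, c ∈ l := fun c hc => (List.dropWhile_sublist _).mem hc
  set d := l.dropWhile pvWsB with hd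
  have hdN : '\n' ∉ d := fun hc => hn (hsub _ hc)
  clear_value d
  rcases d with _ | ⟨c, rest⟩
  · rfl
  · by_cases hc : c = '#'
    · subst hc
      simp only [beq_self_eq_true, ite_true, if_pos]
      rcases rest with _ | ⟨c2, t⟩
      · rfl
      · show pvHeadCheckB (c2 :: t) = _
        by_cases h2 : c2 = '#'
        · subst h2
          simp only [pvHeadCheckB, beq_self_eq_true, ite_true, if_pos]
          exact pv_afterB_eq t (fun hm => hdN (by simp [hm]))
        · have hb : (c2 == '#') = false := by simpa using h2
          simp only [pvHeadCheckB, hb, Bool.false_eq_true, if_neg, ite_false, h2]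
          exact pv_afterB_eq (c2 :: t) (fun hm => hdN (by simp at hm ⊢; tauto))
    · have hb : (c == '#') = false := by simpa using hc
      simp [hb, hc]

theorem pv_lineHead_iff (l : List Char) : pvLineHead l = true ↔
    ∃ x t, l = x ++ '#' :: t ∧ x.all pvWsB = true ∧ pvHeadCheckB t = true := by
  constructor
  · intro h
    unfold pvLineHead at h
    rcases hdh : l.dropWhile pvWsB with _ | ⟨c, rest⟩
    · rw [hdh] at h; simp at h
    · rw [hdh] at h
      by_cases hc : c == '#'
      · refine ⟨l.takeWhile pvWsB, rest, ?_, ?_, ?_⟩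
        · conv_lhs => rw [← List.takeWhile_append_dropWhile (p := pvWsB) (l := l)]
          rw [hdh]
          have : c = '#' := by simpa using hc
          rw [this]
        · rw [List.all_eq_true]
          exact fun c hc => List.mem_takeWhile_imp hc
        · simpa [hc] using h
      · simp only [Bool.not_eq_true] at hc
        simp [hc] at h
  · rintro ⟨x, t, rfl, hall, hch⟩
    unfold pvLineHead
    rw [pv_dropWhile_all (p := pvWsB) x ('#' :: t) (fun c hc => (List.all_eq_true.mp hall) c hc),
      List.dropWhile_cons_of_neg (by decide)]
    simpa using hch

-- ===== pvWsLine toolbox =====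

theorem pv_wsLine_nonl (x : List Char) (hn : '\n' ∉ x) : pvWsLine x = x.all pvWsB := by
  unfold pvWsLine
  rw [pv_takeWhile_nonl x.reverse (by simpa using hn), List.all_reverse]

theorem pv_wsLine_append_nl (a x : List Char) : pvWsLine (a ++ '\n' :: x) = pvWsLine x := by
  unfold pvWsLine
  rw [show (a ++ '\n' :: x).reverse = x.reverse ++ '\n' :: a.reverse by simp,
    pv_takeWhile_append_nl]

-- ===== pvLines toolbox =====

theorem pv_lines_ne_nil (s : List Char) : pvLines s ≠ [] := by
  induction s with
  | nil => simp [pvLines]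
  | cons c r ih =>
    by_cases hc : c = '\n'
    · simp [pvLines, hc]
    · rw [pvLines, if_neg hc]
      cases h : pvLines r with
      | nil => exact absurd h ih
      | cons a t => simp

theorem pv_join_lines (s : List Char) : PySem.Chars.join ['\n'] (pvLines s) = s := by
  induction s with
  | nil => simp [pvLines, PySem.Chars.join_singleton]
  | cons c r ih =>
    by_cases hc : c = '\n'
    · subst hc
      rw [pvLines, if_pos rfl]
      cases hL : pvLines r with
      | nil => exact absurd hL (pv_lines_ne_nil r)
      | cons m T =>
        rw [hL] at ih
        rw [PySem.Chars.join_cons_cons, ih]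
        simp
    · rw [pvLines, if_neg hc]
      cases hL : pvLines r with
      | nil => exact absurd hL (pv_lines_ne_nil r)
      | cons m T =>
        rw [List.modifyHead_cons]
        cases T with
        | nil =>
          rw [PySem.Chars.join_singleton]
          rw [hL, PySem.Chars.join_singleton] at ih
          simp [ih]
        | cons b T' =>
          rw [PySem.Chars.join_cons_cons]
          rw [hL, PySem.Chars.join_cons_cons] at ih
          simp [ih]

theorem pv_cutA_le : ∀ L : List (List Char), pvCutA L ≤ L.length
  | [] => by simp [pvCutA]
  | l :: ls => by
    rw [pvCutA]
    by_cases h : pvHeadA l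
    · simp [h]
    · simp only [h, Bool.false_eq_true, if_neg, ite_false, List.length_cons]
      exact Nat.succ_le_succ (pv_cutA_le ls)

theorem pv_join_cons_cut (L : List (List Char)) (l : List Char) :
    PySem.Chars.join ['\n'] (l :: L.take (pvCutA L)) ++ ['\n'] =
      l ++ '\n' :: (PySem.Chars.join ['\n'] (L.take (pvCutA L)) ++
        (if pvCutA L = 0 then ([] : List Char) else ['\n'])) := by
  cases hc : pvCutA L with
  | zero =>
    simp [PySem.Chars.join_singleton]
  | succ k =>
    cases L with
    | nil => simp [pvCutA] at hc
    | cons b L' =>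
      rw [List.take_succ_cons, PySem.Chars.join_cons_cons]
      simp [hc]

-- ===== no valid hash anywhere → no heading line =====

theorem pv_noValid_cut (s : List Char) (hdom : ∀ c ∈ s, pvDomChar c = true)
    (hnv : ∀ x t, s = x ++ '#' :: t → ¬(pvWsLine x = true ∧ pvHeadCheckB t = true)) :
    pvCutA (pvLines s) = (pvLines s).length := by
  rw [pv_pvLines_eq s]
  have hln : '\n' ∉ s.takeWhile (· != '\n') := fun hm => by
    have := List.mem_takeWhile_imp hm; simp at this
  have hldom : ∀ c ∈ s.takeWhile (· != '\n'), pvDomChar c = true := fun c hc =>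
    hdom c ((List.takeWhile_prefix _).subset hc)
  have hhead : pvHeadA (s.takeWhile (· != '\n')) = false := by
    by_contra hne
    have hA : pvHeadA (s.takeWhile (· != '\n')) = true := by
      revert hne; cases pvHeadA (s.takeWhile (· != '\n')) <;> simp
    have hLH : pvLineHead (s.takeWhile (· != '\n')) = true := by
      rw [pv_lineHead_eq _ hln, pv_head_eq _ hldom hln, hA]
    obtain ⟨x0, t0, hsplit, hall, hch⟩ := (pv_lineHead_iff _).mp hLH
    have hx0n : '\n' ∉ x0 := fun hm => hln (hsplit ▸ by simp [hm])
    have hws0 : pvWsLine x0 = true := by rw [pv_wsLine_nonl x0 hx0n]; exact hall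
    have hs : s = s.takeWhile (· != '\n') ++ s.dropWhile (· != '\n') :=
      (List.takeWhile_append_dropWhile ..).symm
    cases hdr : s.dropWhile (· != '\n') with
    | nil =>
      rw [hdr, List.append_nil] at hs
      exact hnv x0 t0 (hs.trans hsplit) ⟨hws0, hch⟩
    | cons c v =>
      have hc : c = '\n' := by simpa using pv_dropWhile_head s c v hdr
      subst hc
      refine hnv x0 (t0 ++ '\n' :: v) ?_ ⟨hws0, ?_⟩
      · conv_lhs => rw [hs, hdr, hsplit]
        simp
      · rw [pv_headCheck_append_nl]; exact hch
  cases hdr : s.dropWhile (· != '\n') with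
  | nil => simp [pvCutA, hhead]
  | cons c v =>
    have hc : c = '\n' := by simpa using pv_dropWhile_head s c v hdr
    subst hc
    have hvdom : ∀ d ∈ v, pvDomChar d = true := fun d hd =>
      hdom d ((List.dropWhile_sublist _).mem (hdr ▸ List.mem_cons_of_mem _ hd))
    have hs : s = s.takeWhile (· != '\n') ++ '\n' :: v := by
      conv_lhs => rw [← List.takeWhile_append_dropWhile (p := (· != '\n')) (l := s)]
      rw [hdr]
    have hrec := pv_noValid_cut v hvdom (by
      intro x t hxt
      have := hnv (s.takeWhile (· != '\n') ++ '\n' :: x) t (by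
        conv_lhs => rw [hs, hxt]
        simp)
      rw [pv_wsLine_append_nl] at this
      exact this)
    simp [pvCutA, hhead, hrec]
termination_by s.length
decreasing_by
  have h1 := List.length_dropWhile_le (fun c => c != '\n') s
  rw [hdr] at h1
  simp only [List.length_cons] at h1
  omega

-- ===== the first valid hash determines A's cut prefix =====

theorem pv_first_valid (w r : List Char)
    (hdom : ∀ c ∈ w ++ '#' :: r, pvDomChar c = true)
    (hv : pvWsLine w = true ∧ pvHeadCheckB r = true)
    (hfv : ∀ x t, w ++ '#' :: r = x ++ '#' :: t → x.length < w.length →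
      ¬(pvWsLine x = true ∧ pvHeadCheckB t = true)) :
    (w.reverse.dropWhile (· != '\n')).reverse =
      PySem.Chars.join ['\n'] ((pvLines (w ++ '#' :: r)).take (pvCutA (pvLines (w ++ '#' :: r)))) ++
        (if pvCutA (pvLines (w ++ '#' :: r)) = 0 then ([] : List Char) else ['\n']) := by
  by_cases hw : '\n' ∈ w
  · -- the heading hash is on a later line: peel the first line and recurse
    cases hdw : w.dropWhile (· != '\n') with
    | nil =>
      exact absurd ((List.dropWhile_eq_nil_iff.mp hdw) '\n' hw) (by simp)
    | cons c w2 =>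
      have hc : c = '\n' := by simpa using pv_dropWhile_head w c w2 hdw
      subst hc
      have hwdec : w = w.takeWhile (· != '\n') ++ '\n' :: w2 := by
        conv_lhs => rw [← List.takeWhile_append_dropWhile (p := (· != '\n')) (l := w)]
        rw [hdw]
      have hln : '\n' ∉ w.takeWhile (· != '\n') := fun hm => by
        have := List.mem_takeWhile_imp hm; simp at this
      have hsdec : w ++ '#' :: r = w.takeWhile (· != '\n') ++ '\n' :: (w2 ++ '#' :: r) := by
        conv_lhs => rw [hwdec]
        simp
      have hsl : (w ++ '#' :: r).takeWhile (· != '\n') = w.takeWhile (· != '\n') := by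
        rw [hsdec, pv_takeWhile_append_nl, pv_takeWhile_nonl _ hln]
      have hsd : (w ++ '#' :: r).dropWhile (· != '\n') = '\n' :: (w2 ++ '#' :: r) := by
        rw [hsdec, pv_dropWhile_nonl_nl _ _ hln]
      have hldom : ∀ c ∈ w.takeWhile (· != '\n'), pvDomChar c = true := fun c hc =>
        hdom c (List.mem_append_left _ ((List.takeWhile_prefix _).subset hc))
      have hlenw : w.length = (w.takeWhile (· != '\n')).length + 1 + w2.length := by
        conv_lhs => rw [hwdec]
        simp; omega
      have hhead : pvHeadA (w.takeWhile (· != '\n')) = false := by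
        by_contra hne
        have hA : pvHeadA (w.takeWhile (· != '\n')) = true := by
          revert hne; cases pvHeadA (w.takeWhile (· != '\n')) <;> simp
        have hLH : pvLineHead (w.takeWhile (· != '\n')) = true := by
          rw [pv_lineHead_eq _ hln, pv_head_eq _ hldom hln, hA]
        obtain ⟨x0, t0, hsplit, hall, hch⟩ := (pv_lineHead_iff _).mp hLH
        have hx0n : '\n' ∉ x0 := fun hm => hln (hsplit ▸ by simp [hm])
        have hlx : (w.takeWhile (· != '\n')).length = x0.length + 1 + t0.length := by
          rw [hsplit]; simp; omega
        refine hfv x0 (t0 ++ '\n' :: (w2 ++ '#' :: r)) ?_ (by omega)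
          ⟨by rw [pv_wsLine_nonl x0 hx0n]; exact hall, by rw [pv_headCheck_append_nl]; exact hch⟩
        rw [hsdec, hsplit]; simp
      have hws2 : pvWsLine w2 = true := by
        have := hv.1
        rw [hwdec, pv_wsLine_append_nl] at this
        exact this
      have hrec := pv_first_valid w2 r
        (fun c hc => hdom c (by rw [hsdec]; exact List.mem_append_right _ (by simp [hc])))
        ⟨hws2, hv.2⟩
        (by
          intro x t hxt hlen
          have := hfv (w.takeWhile (· != '\n') ++ '\n' :: x) t
            (by rw [hsdec, hxt]; simp) (by simp; omega)
          rw [pv_wsLine_append_nl] at this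
          exact this)
      -- assemble
      rw [pv_pvLines_eq (w ++ '#' :: r), hsl, hsd]
      simp only [pvCutA, hhead, Bool.false_eq_true, if_neg, ite_false]
      rw [List.take_succ_cons]
      have hne : pvCutA (pvLines (w2 ++ '#' :: r)) + 1 ≠ 0 := by omega
      rw [if_neg hne]
      have hJ := pv_join_cons_cut (pvLines (w2 ++ '#' :: r)) (w.takeWhile (· != '\n'))
      rw [hJ, ← hrec]
      -- remains: LHS = l ++ '\n' :: (w2-side LHS)
      conv_lhs => rw [hwdec]
      rw [show (w.takeWhile (· != '\n') ++ '\n' :: w2).reverse =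
        w2.reverse ++ '\n' :: (w.takeWhile (· != '\n')).reverse by simp]
      rw [List.dropWhile_append]
      by_cases hE : (w2.reverse.dropWhile (· != '\n')).isEmpty
      · rw [if_pos hE, List.dropWhile_cons_of_neg (by simp), List.isEmpty_iff.mp hE]
        simp
      · rw [if_neg hE]
        simp
  · -- the heading hash is on the first line: cut = 0
    have hwall : w.all pvWsB = true := by
      have := hv.1
      rw [pv_wsLine_nonl w hw] at this
      exact this
    have hl : (w ++ '#' :: r).takeWhile (· != '\n') = w ++ '#' :: r.takeWhile (· != '\n') := by
      rw [pv_takeWhile_nonl_append _ _ hw, List.takeWhile_cons_of_pos (by decide)]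
    have hlnf : '\n' ∉ (w ++ '#' :: r).takeWhile (· != '\n') := fun hm => by
      have := List.mem_takeWhile_imp hm; simp at this
    have hldom : ∀ c ∈ (w ++ '#' :: r).takeWhile (· != '\n'), pvDomChar c = true := fun c hc =>
      hdom c ((List.takeWhile_prefix _).subset hc)
    have hLH : pvLineHead ((w ++ '#' :: r).takeWhile (· != '\n')) = true := by
      apply (pv_lineHead_iff _).mpr
      exact ⟨w, r.takeWhile (· != '\n'), hl, hwall, by rw [pv_headCheck_takeWhile]; exact hv.2⟩
    have hA : pvHeadA ((w ++ '#' :: r).takeWhile (· != '\n')) = true := by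
      rw [← pv_head_eq _ hldom hlnf, ← pv_lineHead_eq _ hlnf, hLH]
    rw [pv_pvLines_eq (w ++ '#' :: r)]
    simp only [pvCutA, hA, ite_true, if_pos, List.take_zero]
    rw [PySem.Chars.join_nil]
    simp only [if_pos rfl, List.append_nil]
    rw [pv_dropWhile_nonl w.reverse (by simpa using hw)]
    rfl
termination_by w.length
decreasing_by omega

-- lifting a '#'-split across a hash-free block
theorem pv_split_lift (pre before : List Char) (hb : ∀ c ∈ before, c ≠ '#')
    (x t : List Char) (h : x ++ '#' :: t = pre ++ before) :
    ∃ y, pre = x ++ '#' :: y ∧ t = y ++ before := by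
  rcases List.append_eq_append_iff.mp h with ⟨a, ha1, ha2⟩ | ⟨c', hc1, hc2⟩
  · cases a with
    | nil =>
      rw [List.nil_append] at ha2
      exact absurd rfl (hb '#' (ha2 ▸ by simp))
    | cons h1 a' =>
      rw [List.cons_append] at ha2
      injection ha2 with hh ht
      exact ⟨a', by rw [ha1, hh], ht⟩
  · exact absurd rfl (hb '#' (hc2 ▸ by simp))

-- ===== B's scan computes A's strip/join of the kept lines =====

theorem pv_findB_eq (suf pre : List Char)
    (hdom : ∀ c ∈ pre ++ suf, pvDomChar c = true)
    (hinv : ∀ x y, pre = x ++ '#' :: y → ¬(pvWsLine x = true ∧ pvHeadCheckB (y ++ suf) = true)) :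
    pvFindB pre suf =
      PySem.Chars.strip (PySem.Chars.join ['\n']
        ((pvLines (pre ++ suf)).take (pvCutA (pvLines (pre ++ suf))))) := by
  rw [pvFindB]
  have hbefore : ∀ c ∈ suf.takeWhile (· != '#'), c ≠ '#' := fun c hc => by
    have := List.mem_takeWhile_imp hc; simpa using this
  cases hT : suf.dropWhile (· != '#') with
  | nil =>
    have hsuf : suf.takeWhile (· != '#') = suf := by
      conv_rhs => rw [← List.takeWhile_append_dropWhile (p := (· != '#')) (l := suf), hT,
        List.append_nil]
    show PySem.Chars.strip (pre ++ suf.takeWhile (· != '#')) = _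
    rw [hsuf]
    have hnv : ∀ x t, pre ++ suf = x ++ '#' :: t →
        ¬(pvWsLine x = true ∧ pvHeadCheckB t = true) := by
      intro x t hxt
      obtain ⟨y, hy1, hy2⟩ := pv_split_lift pre suf (hsuf ▸ hbefore) x t hxt.symm
      exact hy2 ▸ hinv x y hy1
    rw [pv_noValid_cut (pre ++ suf) hdom hnv, List.take_length, pv_join_lines]
  | cons c r =>
    have hc : c = '#' := by simpa using pv_dropWhile_head suf c r hT
    subst hc
    have hsufdec : suf = suf.takeWhile (· != '#') ++ '#' :: r := by
      conv_lhs => rw [← List.takeWhile_append_dropWhile (p := (· != '#')) (l := suf), hT]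
    have hsdec : pre ++ suf = (pre ++ suf.takeWhile (· != '#')) ++ '#' :: r := by
      conv_lhs => rw [hsufdec]
      simp
    show (if ((pre ++ suf.takeWhile (· != '#')).reverse.takeWhile (· != '\n')).all pvWsB
          && pvHeadCheckB r then
        PySem.Chars.strip (((pre ++ suf.takeWhile (· != '#')).reverse.dropWhile (· != '\n')).reverse)
      else pvFindB (pre ++ suf.takeWhile (· != '#') ++ ['#']) r) =
      PySem.Chars.strip (PySem.Chars.join ['\n']
        ((pvLines (pre ++ suf)).take (pvCutA (pvLines (pre ++ suf)))))
    by_cases hcond : (((pre ++ suf.takeWhile (· != '#')).reverse.takeWhile (· != '\n')).all pvWsB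
        && pvHeadCheckB r) = true
    · rw [if_pos hcond]
      rw [Bool.and_eq_true] at hcond
      have hws : pvWsLine (pre ++ suf.takeWhile (· != '#')) = true := hcond.1
      have hch : pvHeadCheckB r = true := hcond.2
      have hfv : ∀ x t, (pre ++ suf.takeWhile (· != '#')) ++ '#' :: r = x ++ '#' :: t →
          x.length < (pre ++ suf.takeWhile (· != '#')).length →
          ¬(pvWsLine x = true ∧ pvHeadCheckB t = true) := by
        intro x t hxt hlen
        rcases List.append_eq_append_iff.mp hxt.symm with ⟨a, ha1, ha2⟩ | ⟨c', hc1, hc2⟩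
        · cases a with
          | nil =>
            rw [List.append_nil] at ha1
            rw [ha1] at hlen
            omega
          | cons h1 a' =>
            rw [List.cons_append] at ha2
            injection ha2 with hh ht
            subst hh
            obtain ⟨y, hy1, hy2⟩ := pv_split_lift pre (suf.takeWhile (· != '#')) hbefore x a' ha1.symm
            have hts : t = y ++ suf := by
              rw [ht, hy2, List.append_assoc, ← hsufdec]
            rw [hts]
            exact hinv x y hy1
        · have hxlen := congrArg List.length hc1
          simp at hxlen
          simp only [List.length_append] at hlen
          omega
      have := pv_first_valid (pre ++ suf.takeWhile (· != '#')) r (hsdec ▸ hdom) ⟨hws, hch⟩ hfv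
      rw [hsdec, this]
      cases hcut : pvCutA (pvLines ((pre ++ suf.takeWhile (· != '#')) ++ '#' :: r)) with
      | zero => simp
      | succ k =>
        rw [if_neg (by omega)]
        exact pv_strip_snoc_nl _
    · rw [if_neg hcond]
      have hinv' : ∀ x y, pre ++ suf.takeWhile (· != '#') ++ ['#'] = x ++ '#' :: y →
          ¬(pvWsLine x = true ∧ pvHeadCheckB (y ++ r) = true) := by
        intro x y hxy
        rcases List.append_eq_append_iff.mp hxy.symm with ⟨a, ha1, ha2⟩ | ⟨c', hc1, hc2⟩
        · cases a with
          | nil =>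
            rw [List.append_nil] at ha1
            rw [List.nil_append] at ha2
            have hy : y = [] := congrArg List.tail ha2
            subst hy
            rw [← ha1, List.nil_append]
            intro hcontra
            exact hcond (by rw [Bool.and_eq_true]; exact ⟨hcontra.1, hcontra.2⟩)
          | cons h1 a' =>
            rw [List.cons_append] at ha2
            injection ha2 with hh ht
            subst hh
            obtain ⟨z, hz1, hz2⟩ := pv_split_lift pre (suf.takeWhile (· != '#')) hbefore x a' ha1.symm
            have hy : y = z ++ suf.takeWhile (· != '#') ++ ['#'] := by rw [ht, hz2]
            rw [hy]
            have hzs : (z ++ suf.takeWhile (· != '#') ++ ['#']) ++ r = z ++ suf := by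
              conv_rhs => rw [hsufdec]
              simp
            rw [hzs]
            exact hinv x z hz1
        · cases c' with
          | cons d c'' => simp at hc2
          | nil =>
            rw [List.nil_append] at hc2
            have hy : y = [] := (congrArg List.tail hc2).symm
            rw [List.append_nil] at hc1
            subst hy
            rw [hc1, List.nil_append]
            intro hcontra
            exact hcond (by rw [Bool.and_eq_true]; exact ⟨hcontra.1, hcontra.2⟩)
      have hdom' : ∀ c ∈ (pre ++ suf.takeWhile (· != '#') ++ ['#']) ++ r, pvDomChar c = true := by
        intro c hc
        apply hdom c
        rw [hsdec]
        simpa using hc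
      rw [pv_findB_eq r (pre ++ suf.takeWhile (· != '#') ++ ['#']) hdom' hinv']
      rw [hsdec]
      simp
termination_by suf.length
decreasing_by
  have h1 := List.length_dropWhile_le (fun c => c != '#') suf
  rw [hT] at h1
  simp only [List.length_cons] at h1
  omega

-- ===== VERDICT (by name: the statement is the Claim_ definition above) =====
theorem truncate_to_valid_yaml_py_spec : Claim_equal_truncate_to_valid_yaml_py := by
  intro text hdom
  unfold Spec_truncate_to_valid_yaml_py truncate_to_valid_yaml_py truncate_to_valid_yaml_py_alt
  have hd : ∀ c ∈ text.toList, pvDomChar c = true := by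
    unfold Dom_truncate_to_valid_yaml_py pvDomStr at hdom
    simpa [List.all_eq_true] using hdom
  rw [pv_splitOn_eq, pv_findB_eq text.toList [] (by simpa using hd) (by intro x y h; simp at h)]
  simp
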